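-- pv_equiv track=rewrite | github.com/khaphong229/CODE-PYTHON-PTIT | tongchuso.py | dem
-- ===== SOURCE A (Python) =====
-- def dem(n):
--     cnt=0
--     if n<=9: return 1
--     while n>=10:
--         sum=0
--         while n>0:
--             sum+=n%10
--             n//=10
--         n=sum
--         cnt+=1
--     return cnt
-- ===== SOURCE B (Python) =====
-- def dem(n):
--     if n <= 9:
--         return 1
--     return _pers(n)
--
-- def _pers(m):
--     if m <= 9:
--         return 0
--     return 1 + _pers(_digsum(m))
--
-- def _digsum(m):
--     if m < 10:
--         return m
--     return _digsum(m // 10) + m % 10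
-- ===== Notes on version B (the rewrite author's own statement) =====
-- stated objective: simpler
-- what changed: Replaces A's nested while loops with mutable accumulators (cnt, sum) by two small direct recursions: a recursive digit-sum and a recursive persistence counter 1 + pers(digsum(m)), keeping the public quirk dem(n)=1 for n<=9.
import Mathlib
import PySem

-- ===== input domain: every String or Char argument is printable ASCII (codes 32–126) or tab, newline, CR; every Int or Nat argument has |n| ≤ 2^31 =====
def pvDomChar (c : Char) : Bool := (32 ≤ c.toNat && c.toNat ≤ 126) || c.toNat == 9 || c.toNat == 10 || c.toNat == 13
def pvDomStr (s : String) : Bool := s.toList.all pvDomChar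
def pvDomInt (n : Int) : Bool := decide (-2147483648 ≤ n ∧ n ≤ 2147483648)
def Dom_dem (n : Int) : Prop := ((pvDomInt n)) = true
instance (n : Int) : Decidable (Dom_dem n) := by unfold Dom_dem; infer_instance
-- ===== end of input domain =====

-- B replaces A's nested while loops with two direct recursions (digit sum, then 1 + pers) — simpler decomposition, same cost.
-- Loops/recursions are ported with a structural fuel of n.toNat, which the lemmas show is always sufficient (a totality guard only).

-- ===== PORT A =====
-- inner 'while n>0: sum+=n%10; n//=10' loop of A, state (n, sum); fuel ≥ n.toNat suffices
def demInnerF : Nat → Int → Int → Int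
  | 0, _, s => s
  | fuel + 1, n, s =>
    if 0 < n then demInnerF fuel (PySem.Int.floordiv n 10) (s + PySem.Int.mod n 10) else s

-- outer 'while n>=10' loop of A, state (n, cnt); fuel ≥ n.toNat suffices
def demOuterF : Nat → Int → Int → Int
  | 0, _, cnt => cnt
  | fuel + 1, n, cnt =>
    if 10 ≤ n then demOuterF fuel (demInnerF n.toNat n 0) (cnt + 1) else cnt

def dem (n : Int) : Int :=
  if n ≤ 9 then 1 else demOuterF n.toNat n 0

-- ===== PORT B =====
-- recursive digit sum: _digsum(m) = m if m < 10 else _digsum(m//10) + m%10; fuel ≥ m.toNat suffices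
def digsumF : Nat → Int → Int
  | 0, m => m
  | fuel + 1, m =>
    if m < 10 then m else digsumF fuel (PySem.Int.floordiv m 10) + PySem.Int.mod m 10

-- recursive persistence: _pers(m) = 0 if m <= 9 else 1 + _pers(_digsum(m)); fuel ≥ m.toNat suffices
def persF : Nat → Int → Int
  | 0, _ => 0
  | fuel + 1, m =>
    if m ≤ 9 then 0 else 1 + persF fuel (digsumF m.toNat m)

def dem_alt (n : Int) : Int :=
  if n ≤ 9 then 1 else persF n.toNat n

-- ===== PRECONDITION & SPEC =====
def Spec_dem (n : Int) (out : Int) : Prop := out = dem_alt n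
instance (n : Int) (out : Int) : Decidable (Spec_dem n out) := by unfold Spec_dem; infer_instance

-- ===== CLAIM (what is proved, stated in full; the proofs are below) =====
def Claim_equal_dem : Prop := ∀ (n : Int), Dom_dem n → Spec_dem n (dem n)

-- ===== LEMMAS AND PROOFS =====

theorem digsumF_zero (f : Nat) : digsumF f 0 = 0 := by
  cases f <;> simp [digsumF]

theorem digsumF_bounds (f : Nat) : ∀ (m : Int), m.toNat ≤ f → 0 ≤ m →
    0 ≤ digsumF f m ∧ digsumF f m ≤ m := by
  induction f with
  | zero =>
    intro m hk hm
    have h0 : m = 0 := by omega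
    subst h0
    simp [digsumF]
  | succ f ih =>
    intro m hk hm
    rw [digsumF]
    split_ifs with h
    · omega
    · rw [PySem.Int.floordiv_eq_ediv_of_pos (by norm_num),
        PySem.Int.mod_eq_emod_of_pos (by norm_num)]
      have := ih (m / 10) (by omega) (by omega)
      omega

theorem digsumF_lt (f : Nat) (m : Int) (hk : m.toNat ≤ f) (h : 10 ≤ m) :
    0 ≤ digsumF f m ∧ digsumF f m < m := by
  cases f with
  | zero => omega
  | succ f =>
    rw [digsumF, if_neg (by omega),
      PySem.Int.floordiv_eq_ediv_of_pos (by norm_num),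
      PySem.Int.mod_eq_emod_of_pos (by norm_num)]
    have := digsumF_bounds f (m / 10) (by omega) (by omega)
    omega

theorem demInnerF_eq_digsumF (f : Nat) : ∀ (n s : Int), n.toNat ≤ f → 0 ≤ n →
    demInnerF f n s = s + digsumF f n := by
  induction f with
  | zero =>
    intro n s hk hn
    have h0 : n = 0 := by omega
    subst h0
    simp [demInnerF, digsumF]
  | succ f ih =>
    intro n s hk hn
    rw [demInnerF]
    split_ifs with h
    · rw [PySem.Int.floordiv_eq_ediv_of_pos (by norm_num),
        PySem.Int.mod_eq_emod_of_pos (by norm_num),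
        ih (n / 10) (s + n % 10) (by omega) (by omega)]
      by_cases h10 : n < 10
      · have hq : n / 10 = 0 := by omega
        rw [hq, digsumF_zero]
        rw [show digsumF (f + 1) n = n by rw [digsumF]; rw [if_pos h10]]
        omega
      · conv_rhs => rw [digsumF]
        rw [if_neg h10,
          PySem.Int.floordiv_eq_ediv_of_pos (by norm_num),
          PySem.Int.mod_eq_emod_of_pos (by norm_num)]
        omega
    · have h0 : n = 0 := by omega
      subst h0
      rw [digsumF_zero]
      omega

theorem demOuterF_eq_persF (f : Nat) : ∀ (n cnt : Int), n.toNat ≤ f →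
    demOuterF f n cnt = cnt + persF f n := by
  induction f with
  | zero =>
    intro n cnt hk
    simp [demOuterF, persF]
  | succ f ih =>
    intro n cnt hk
    rw [demOuterF, persF]
    by_cases h : 10 ≤ n
    · rw [if_pos h, if_neg (by omega)]
      rw [demInnerF_eq_digsumF n.toNat n 0 (le_refl _) (by omega)]
      have hlt := digsumF_lt n.toNat n (le_refl _) h
      rw [show (0 : Int) + digsumF n.toNat n = digsumF n.toNat n by omega]
      rw [ih (digsumF n.toNat n) (cnt + 1) (by omega)]
      omega
    · rw [if_neg h, if_pos (by omega)]
      omega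

-- ===== VERDICT (by name: the statement is the Claim_ definition above) =====
theorem dem_spec : Claim_equal_dem := by
  intro n _
  show dem n = dem_alt n
  unfold dem dem_alt
  split_ifs with h
  · rfl
  · rw [demOuterF_eq_persF n.toNat n 0 (le_refl _)]
    omega
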